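-- pv_equiv track=rewrite | github.com/reptiloidok/No_Thanks_Game | hand.py | build_chains
-- ===== SOURCE A (Python) =====
-- def build_chains(cards):
--     chains = []
--     sorted_numbers = sorted(cards, reverse=True)
--     current_chain = [sorted_numbers[0]]
--     for i in range(1, len(sorted_numbers)):
--         if sorted_numbers[i] == current_chain[-1] - 1:
--             current_chain.append(sorted_numbers[i])
--         else:
--             chains.append(current_chain)
--             current_chain = [sorted_numbers[i]]
--     chains.append(current_chain)
--     return chains
-- ===== SOURCE B (Python) =====
-- def build_chains(cards):
--     s = sorted(cards, reverse=True)
--     bounds = [0] + [i for i in range(1, len(s)) if s[i] != s[i - 1] - 1] + [len(s)]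
--     return [s[a:b] for a, b in zip(bounds, bounds[1:])]
-- ===== Notes on version B (the rewrite author's own statement) =====
-- stated objective: alternative
-- what changed: Replaced the stateful current_chain/chains accumulator loop with a declarative decomposition: compute all break indices (where s[i] != s[i-1]-1) in one comprehension, then emit the chains as slices between consecutive bounds.
-- outside the precondition, e.g. on build_chains([]): A raises IndexError, B returns [[]]
import Mathlib
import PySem

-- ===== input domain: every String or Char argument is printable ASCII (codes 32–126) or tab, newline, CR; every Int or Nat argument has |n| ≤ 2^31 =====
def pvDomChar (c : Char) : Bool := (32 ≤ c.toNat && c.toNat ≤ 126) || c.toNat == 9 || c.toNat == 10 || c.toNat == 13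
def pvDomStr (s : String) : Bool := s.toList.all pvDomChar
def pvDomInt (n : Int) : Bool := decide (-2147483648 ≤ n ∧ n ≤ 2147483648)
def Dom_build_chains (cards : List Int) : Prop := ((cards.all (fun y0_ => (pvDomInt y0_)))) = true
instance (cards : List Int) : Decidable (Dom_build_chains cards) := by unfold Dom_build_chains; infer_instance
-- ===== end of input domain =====

-- B replaces A's stateful current_chain/chains accumulator loop by computing all break
-- indices and slicing between consecutive bounds; equivalence proved on nonempty inputs.

-- ===== PORT A =====
-- current_chain[-1] and sorted_numbers[0] are ported with pyGetD (default 0): current_chain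
-- is always nonempty during the loop, and Pre_ excludes the empty input on which
-- sorted_numbers[0] raises IndexError.
def build_chains (cards : List Int) : List (List Int) :=
  let sorted_numbers := PySem.List.sorted cards (fun v => v) true
  let st := (PySem.List.pyRange 1 (PySem.List.len sorted_numbers) 1).foldl
    (fun acc i =>
      if PySem.List.pyGetD sorted_numbers i 0 = PySem.List.pyGetD acc.2 (-1) 0 - 1 then
        (acc.1, acc.2 ++ [PySem.List.pyGetD sorted_numbers i 0])
      else (acc.1 ++ [acc.2], [PySem.List.pyGetD sorted_numbers i 0]))
    (([] : List (List Int)), [PySem.List.pyGetD sorted_numbers 0 0])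
  st.1 ++ [st.2]

-- ===== PORT B =====
def build_chains_alt (cards : List Int) : List (List Int) :=
  let s := PySem.List.sorted cards (fun v => v) true
  let bounds := 0 :: ((PySem.List.pyRange 1 (PySem.List.len s) 1).filter
      (fun i => decide (PySem.List.pyGetD s i 0 ≠ PySem.List.pyGetD s (i - 1) 0 - 1))
      ++ [PySem.List.len s])
  (List.zip bounds (PySem.List.slice bounds (some 1) none)).map
    (fun p => PySem.List.slice s (some p.1) (some p.2))

-- ===== PRECONDITION & SPEC =====
-- Pre_ excludes only the empty list, on which A raises IndexError (sorted_numbers[0]).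
def Pre_build_chains (cards : List Int) : Prop := cards ≠ []
instance (cards : List Int) : Decidable (Pre_build_chains cards) := by unfold Pre_build_chains; infer_instance
def pvWitness_build_chains : List Int := [3, 2, 7]

def Spec_build_chains (cards : List Int) (out : List (List Int)) : Prop := out = build_chains_alt cards
instance (cards : List Int) (out : List (List Int)) : Decidable (Spec_build_chains cards out) := by unfold Spec_build_chains; infer_instance

-- ===== CLAIM (what is proved, stated in full; the proofs are below) =====
def Claim_equal_build_chains : Prop := ∀ (cards : List Int), Dom_build_chains cards → Pre_build_chains cards → Spec_build_chains cards (build_chains cards)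

-- ===== LEMMAS AND PROOFS =====

def splitRun (x : Int) : List Int → List Int × List (List Int)
  | [] => ([], [])
  | y :: r =>
      let p := splitRun y r
      if y = x - 1 then (y :: p.1, p.2) else ([], (y :: p.1) :: p.2)

theorem pyGetD_neg_one_append (l : List Int) (y : Int) :
    PySem.List.pyGetD (l ++ [y]) (-1) 0 = y := by
  simp [PySem.List.pyGetD, PySem.List.pyGet?, PySem.List.pyIdx?]

theorem pyGetD_neg_one_singleton (y : Int) :
    PySem.List.pyGetD [y] (-1) 0 = y := pyGetD_neg_one_append [] y

theorem foldA (t : List Int) : ∀ (chains : List (List Int)) (cur : List Int) (x : Int),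
    PySem.List.pyGetD cur (-1) 0 = x →
    (t.foldl (fun acc v =>
        if v = PySem.List.pyGetD acc.2 (-1) 0 - 1 then (acc.1, acc.2 ++ [v])
        else (acc.1 ++ [acc.2], [v])) (chains, cur)).1
      ++ [(t.foldl (fun acc v =>
        if v = PySem.List.pyGetD acc.2 (-1) 0 - 1 then (acc.1, acc.2 ++ [v])
        else (acc.1 ++ [acc.2], [v])) (chains, cur)).2]
      = chains ++ ((cur ++ (splitRun x t).1) :: (splitRun x t).2) := by
  induction t with
  | nil => intro chains cur x _; simp [splitRun]
  | cons y r ih =>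
      intro chains cur x hx
      simp only [List.foldl_cons, hx, splitRun]
      by_cases h : y = x - 1
      · rw [if_pos h, if_pos h]
        rw [ih chains (cur ++ [y]) y (by rw [pyGetD_neg_one_append])]
        simp
      · rw [if_neg h, if_neg h]
        rw [ih (chains ++ [cur]) [y] y (pyGetD_neg_one_singleton y)]
        simp

def breaks (s : List Int) : List Int :=
  (PySem.List.pyRange 1 (PySem.List.len s) 1).filter
    (fun i => decide (PySem.List.pyGetD s i 0 ≠ PySem.List.pyGetD s (i - 1) 0 - 1))

def sl (s : List Int) (lo : Int) : List Int → List (List Int)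
  | [] => []
  | b :: bs => PySem.List.slice s (some lo) (some b) :: sl s b bs

theorem zip_map_eq_sl (s : List Int) (bs : List Int) : ∀ lo,
    (List.zip (lo :: bs) bs).map (fun p => PySem.List.slice s (some p.1) (some p.2))
      = sl s lo bs := by
  induction bs with
  | nil => intro lo; simp [sl]
  | cons b bs2 ih => intro lo; simp only [List.zip_cons_cons, List.map_cons, sl, ih b]

theorem pyGetD_cons_shift (x : Int) (t : List Int) (i : Int) (h : 0 ≤ i) :
    PySem.List.pyGetD (x :: t) (i + 1) 0 = PySem.List.pyGetD t i 0 := by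
  obtain ⟨k, rfl⟩ := Int.eq_ofNat_of_zero_le h
  have : ((k : Int) + 1) = ((k + 1 : Nat) : Int) := by push_cast; ring
  rw [this, PySem.List.pyGetD_natCast, PySem.List.pyGetD_natCast]
  simp

theorem pyRange_shift (n : Int) (h : 1 ≤ n) :
    PySem.List.pyRange 1 (n + 1) 1 = 1 :: (PySem.List.pyRange 1 n 1).map (· + 1) := by
  rw [PySem.List.pyRange_one, PySem.List.pyRange_one]
  have h1 : (n + 1 - 1).toNat = (n - 1).toNat + 1 := by omega
  rw [h1, List.range_succ_eq_map]
  simp [List.map_map, Function.comp]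
  intro a _; ring

theorem slice_cons_shift (x : Int) (t : List Int) (a b : Int) (ha : 1 ≤ a) (hb : 1 ≤ b) :
    PySem.List.slice (x :: t) (some a) (some b) = PySem.List.slice t (some (a - 1)) (some (b - 1)) := by
  rw [PySem.List.slice_toNat _ (by omega) (by omega), PySem.List.slice_toNat _ (by omega) (by omega)]
  have h1 : a.toNat = (a - 1).toNat + 1 := by omega
  have h2 : b.toNat - ((a - 1).toNat + 1) = (b - 1).toNat - (a - 1).toNat := by omega
  rw [h1, h2]
  simp

theorem sl_cons_shift (x : Int) (t : List Int) (bs : List Int) : ∀ lo, 1 ≤ lo →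
    (∀ b ∈ bs, 1 ≤ b) →
    sl (x :: t) lo bs = sl t (lo - 1) (bs.map (· - 1)) := by
  induction bs with
  | nil => intro lo _ _; simp [sl]
  | cons b bs2 ih =>
      intro lo hlo hb
      simp only [List.map_cons, sl]
      rw [slice_cons_shift x t lo b hlo (hb b (by simp)),
          ih b (hb b (by simp)) (fun c hc => hb c (by simp [hc]))]

theorem len_nonneg (t : List Int) : 0 ≤ PySem.List.len t := by
  simp [PySem.List.len]

theorem len_cons (x : Int) (t : List Int) :
    PySem.List.len (x :: t) = PySem.List.len t + 1 := by
  simp [PySem.List.len]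

theorem breaks_mem (s : List Int) (i : Int) (h : i ∈ breaks s) :
    1 ≤ i ∧ i < PySem.List.len s := by
  unfold breaks at h
  rw [List.mem_filter] at h
  exact (PySem.List.mem_pyRange_one.mp h.1)

theorem pyGetD_zero (x : Int) (t : List Int) : PySem.List.pyGetD (x :: t) 0 0 = x := by
  simp [PySem.List.pyGetD, PySem.List.pyGet?, PySem.List.pyIdx?]

theorem pyGetD_one (x y : Int) (r : List Int) : PySem.List.pyGetD (x :: y :: r) 1 0 = y := by
  simp [PySem.List.pyGetD, PySem.List.pyGet?, PySem.List.pyIdx?]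

theorem breaks_cons (x y : Int) (r : List Int) :
    breaks (x :: y :: r) = (if y = x - 1 then [] else [1]) ++ (breaks (y :: r)).map (· + 1) := by
  unfold breaks
  rw [len_cons, pyRange_shift _ (by rw [len_cons]; have := len_nonneg r; omega)]
  rw [List.filter_cons]
  have h1 : (decide (PySem.List.pyGetD (x :: y :: r) 1 0 ≠ PySem.List.pyGetD (x :: y :: r) (1 - 1) 0 - 1)) = decide (y ≠ x - 1) := by
    norm_num [pyGetD_one, pyGetD_zero]
  rw [h1, List.filter_map]
  have hfc : List.filter ((fun i => decide (PySem.List.pyGetD (x :: y :: r) i 0 ≠ PySem.List.pyGetD (x :: y :: r) (i - 1) 0 - 1)) ∘ (· + 1)) (PySem.List.pyRange 1 (PySem.List.len (y :: r)) 1)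
      = List.filter (fun i => decide (PySem.List.pyGetD (y :: r) i 0 ≠ PySem.List.pyGetD (y :: r) (i - 1) 0 - 1)) (PySem.List.pyRange 1 (PySem.List.len (y :: r)) 1) := by
    apply List.filter_congr
    intro i hi
    have hmem := PySem.List.mem_pyRange_one.mp hi
    simp only [Function.comp]
    have e1 : i + 1 - 1 = (i - 1) + 1 := by ring
    rw [pyGetD_cons_shift x (y :: r) i (by omega), e1,
        pyGetD_cons_shift x (y :: r) (i - 1) (by omega)]
  rw [hfc]
  split_ifs with hd he <;> simp_all

theorem slice_zero_cons (x : Int) (t : List Int) (b : Int) (hb : 0 ≤ b) :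
    PySem.List.slice (x :: t) (some 0) (some (b + 1)) = x :: PySem.List.slice t (some 0) (some b) := by
  rw [PySem.List.slice_toNat _ (by omega) (by omega), PySem.List.slice_toNat _ (by omega) (by omega)]
  have h1 : (b + 1).toNat = b.toNat + 1 := by omega
  simp [h1]

theorem sl_zero_shift (x : Int) (t : List Int) (b0 : Int) (bs2 : List Int)
    (hb0 : 1 ≤ b0) (hbs : ∀ b ∈ bs2, 1 ≤ b) :
    sl (x :: t) 0 ((b0 :: bs2).map (· + 1)) = (x :: PySem.List.slice t (some 0) (some b0)) :: sl t b0 bs2 := by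
  simp only [List.map_cons, sl]
  rw [slice_zero_cons x t b0 (by omega),
      sl_cons_shift x t (bs2.map (· + 1)) (b0 + 1) (by omega)
        (by intro b hb; obtain ⟨c, hc, rfl⟩ := List.mem_map.mp hb; have := hbs c hc; omega)]
  have : (bs2.map (· + 1)).map (· - 1) = bs2 := by
    rw [List.map_map, show ((· - 1) ∘ (· + 1) : Int → Int) = id from funext (fun a => by simp), List.map_id]
  rw [this]
  norm_num

theorem B_main (t : List Int) : ∀ x : Int,
    sl (x :: t) 0 (breaks (x :: t) ++ [PySem.List.len (x :: t)])
      = (x :: (splitRun x t).1) :: (splitRun x t).2 := by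
  induction t with
  | nil =>
      intro x
      have : breaks [x] = [] := by
        unfold breaks
        rw [PySem.List.pyRange_one_eq_nil (by simp [PySem.List.len])]
        simp
      rw [this]
      simp only [List.nil_append, sl, splitRun]
      norm_num [PySem.List.len, PySem.List.slice_toNat]
  | cons y r ih =>
      intro x
      rw [breaks_cons, len_cons]
      by_cases h : y = x - 1
      · rw [if_pos h]
        simp only [List.nil_append]
        have hlist : (breaks (y :: r)).map (· + 1) ++ [PySem.List.len (y :: r) + 1]
            = ((breaks (y :: r) ++ [PySem.List.len (y :: r)]).map (· + 1)) := by
          simp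
        rw [hlist]
        have hne : breaks (y :: r) ++ [PySem.List.len (y :: r)] ≠ [] := by simp
        obtain ⟨b0, bs2, he⟩ := List.exists_cons_of_ne_nil hne
        rw [he]
        have hall : ∀ b ∈ b0 :: bs2, 1 ≤ b := by
          intro b hb
          rw [← he] at hb
          rcases List.mem_append.mp hb with h1 | h1
          · exact (breaks_mem _ _ h1).1
          · simp at h1; subst h1; omega
        rw [sl_zero_shift x (y :: r) b0 bs2 (hall b0 (by simp)) (fun b hb => hall b (by simp [hb]))]
        have ihy := ih y
        rw [he] at ihy
        simp only [sl] at ihy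
        simp only [splitRun, if_pos h]
        obtain ⟨h1, h2⟩ := List.cons_eq_cons.mp ihy
        rw [h1, h2]
      · rw [if_neg h]
        have hlist : ([(1 : Int)] ++ (breaks (y :: r)).map (· + 1)) ++ [PySem.List.len (y :: r) + 1]
            = 1 :: ((breaks (y :: r) ++ [PySem.List.len (y :: r)]).map (· + 1)) := by simp
        rw [hlist]
        simp only [sl]
        have hsl1 : PySem.List.slice (x :: y :: r) (some 0) (some 1) = [x] := by
          norm_num [PySem.List.slice_toNat]
        have hshift := sl_cons_shift x (y :: r) ((breaks (y :: r) ++ [PySem.List.len (y :: r)]).map (· + 1)) 1 (by omega)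
          (by intro b hb
              obtain ⟨c, hc, rfl⟩ := List.mem_map.mp hb
              rcases List.mem_append.mp hc with h1 | h1
              · have := (breaks_mem _ _ h1).1; omega
              · simp at h1; subst h1; have := len_nonneg (y :: r); omega)
        have hmm : ((breaks (y :: r) ++ [PySem.List.len (y :: r)]).map (· + 1)).map (· - 1)
            = breaks (y :: r) ++ [PySem.List.len (y :: r)] := by
          rw [List.map_map, show ((· - 1) ∘ (· + 1) : Int → Int) = id from funext (fun a => by simp), List.map_id]
        rw [hmm] at hshift
        have ihy := ih y
        simp only [PySem.List.len, List.length_cons, List.map_append, List.map_cons, List.map_nil,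
          Nat.cast_add, Nat.cast_one, show (1:Int) - 1 = 0 by decide] at hshift ihy ⊢
        rw [hsl1, hshift, ihy]
        simp [splitRun, if_neg h]

theorem final_eq (cards : List Int) (hpre : Pre_build_chains cards) :
    build_chains cards = build_chains_alt cards := by
  unfold build_chains build_chains_alt
  have hs : PySem.List.sorted cards (fun v => v) true ≠ [] := by
    intro hnil
    exact hpre ((PySem.List.sorted_eq_nil_iff _ _ _).mp hnil)
  obtain ⟨x, t, he⟩ := List.exists_cons_of_ne_nil hs
  rw [he]
  dsimp only
  -- A side
  rw [PySem.List.foldl_pyRange_pyGetD (xs := x :: t) (d := 0) (a := 1)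
      (f := fun acc v => if v = PySem.List.pyGetD acc.2 (-1) 0 - 1 then (acc.1, acc.2 ++ [v])
            else (acc.1 ++ [acc.2], [v]))
      (init := (([] : List (List Int)), [PySem.List.pyGetD (x :: t) 0 0])) (by omega)]
  rw [pyGetD_zero]
  have hA := foldA t [] [x] x (pyGetD_neg_one_singleton x)
  simp only [show ((1:Int)).toNat = 1 from rfl, List.drop_one, List.tail_cons]
  rw [hA]
  -- B side
  rw [PySem.List.slice_from_one]
  rw [List.tail_cons, zip_map_eq_sl]
  have hB := B_main t x
  unfold breaks at hB
  rw [hB]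
  simp

theorem build_chains_spec : Claim_equal_build_chains := by
  intro cards _ hpre
  unfold Spec_build_chains
  exact final_eq cards hpre
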